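-- pv_equiv track=rewrite | github.com/xianwinwin/RemoteTest1 | py_neetc/binary_search/almost.py | get_almost
-- ===== SOURCE A (Python) =====
-- def get_almost(nums: int, target: int, req_type='exact') -> int:
--
--     l,r=0,len(nums)-1
--
--     while (l<=r):
--
--         mid = l + (r-l)//2
--         if nums[mid]==target:
--             return nums[mid]
--
--         if nums[mid]>target:
--             r = mid - 1
--         else:
--             l = mid + 1
--
--     if req_type=='near_left':
--         return nums[r]
--
--     if req_type=='near_right':
--         return nums[l]
--
--     #exact
--     return -1
-- ===== SOURCE B (Python) =====
-- def get_almost(nums, target, req_type='exact'):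
--     # One forward pass computing the insertion point, then the same fallbacks.
--     idx = 0
--     n = len(nums)
--     while idx < n and nums[idx] < target:
--         idx += 1
--     if idx < n and nums[idx] == target:
--         return nums[idx]
--     if req_type == 'near_left':
--         return nums[idx - 1]
--     if req_type == 'near_right':
--         return nums[idx]
--     return -1
-- ===== Notes on version B (the rewrite author's own statement) =====
-- stated objective: simpler
-- what changed: Replaces the binary search with a single forward linear scan that computes the same insertion point, then applies the identical near_left/near_right/exact fallbacks; Pre_ admits sorted input (the contract of binary search) minus the inputs where A raises IndexError, plus any input with a non-near req_type and target absent (both return -1 there).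
-- outside the precondition, e.g. on get_almost([3, 1, 2], 2, 'exact'): A returns 2, B returns -1
import Mathlib
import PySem

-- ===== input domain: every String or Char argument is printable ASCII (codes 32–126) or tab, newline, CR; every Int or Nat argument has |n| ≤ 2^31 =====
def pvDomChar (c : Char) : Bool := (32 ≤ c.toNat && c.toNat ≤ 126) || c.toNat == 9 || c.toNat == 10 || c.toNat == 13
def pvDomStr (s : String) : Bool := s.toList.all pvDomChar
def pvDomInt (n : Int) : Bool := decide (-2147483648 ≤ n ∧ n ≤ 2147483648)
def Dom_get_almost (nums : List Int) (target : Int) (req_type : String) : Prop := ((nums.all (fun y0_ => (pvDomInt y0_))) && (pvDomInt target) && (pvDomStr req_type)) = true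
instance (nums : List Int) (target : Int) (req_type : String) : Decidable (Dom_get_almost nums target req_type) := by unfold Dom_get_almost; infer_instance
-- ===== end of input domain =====

-- B replaces A's binary search with one forward linear scan to the insertion point (objective: simpler).


-- nums[i] (Python subscript, negative index from the end); the `none` case (IndexError) is excluded by Pre_
def pyAt (nums : List Int) (i : Int) : Int := (PySem.List.pyGet? nums i).getD 0

-- ===== PORT A =====
-- the while loop of A: state (l, r), literal branch order
def goA (nums : List Int) (target : Int) (req_type : String) (l r : Int) : Int :=
  if l ≤ r then
    let mid := l + PySem.Int.floordiv (r - l) 2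
    if pyAt nums mid = target then pyAt nums mid
    else if pyAt nums mid > target then goA nums target req_type l (mid - 1)
    else goA nums target req_type (mid + 1) r
  else
    if req_type = "near_left" then pyAt nums r
    else if req_type = "near_right" then pyAt nums l
    else -1
termination_by (r + 1 - l).toNat
decreasing_by
  · have h := PySem.Int.floordiv_two_mid_bounds (lo := 0) (hi := r - l) (by omega)
    rw [zero_add] at h; omega
  · have h := PySem.Int.floordiv_two_mid_bounds (lo := 0) (hi := r - l) (by omega)
    rw [zero_add] at h; omega

def get_almost (nums : List Int) (target : Int) (req_type : String) : Int :=
  goA nums target req_type 0 (nums.length - 1)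

-- ===== PORT B =====
-- the while loop of B: advance idx while nums[idx] < target
def scanB (nums : List Int) (target : Int) (idx : Nat) : Nat :=
  if h : idx < nums.length then
    if nums[idx] < target then scanB nums target (idx + 1) else idx
  else idx
termination_by nums.length - idx

-- the fallback tail of B (identical index expressions as in Source B)
def fallbackB (nums : List Int) (req_type : String) (idx : Int) : Int :=
  if req_type = "near_left" then pyAt nums (idx - 1)
  else if req_type = "near_right" then pyAt nums idx
  else -1

def get_almost_alt (nums : List Int) (target : Int) (req_type : String) : Int :=
  let idx := scanB nums target 0
  if idx < nums.length ∧ pyAt nums (idx : Int) = target then pyAt nums (idx : Int)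
  else fallbackB nums req_type (idx : Int)

-- ===== PRECONDITION & SPEC =====
-- Pre_ admits (first disjunct) sorted nondecreasing input — the contract a binary search needs (on
-- unsorted input A's probe sequence returns accidental values) — minus the inputs where A raises
-- IndexError (near_left on an empty list, near_right with every element below target), and (second
-- disjunct) any input, sorted or not, with a non-near req_type and target absent, where both
-- programs return -1.
def Pre_get_almost (nums : List Int) (target : Int) (req_type : String) : Prop :=
  (List.Pairwise (· ≤ ·) nums ∧
    (req_type = "near_left" → nums ≠ []) ∧
    (req_type = "near_right" → ∃ x ∈ nums, target ≤ x)) ∨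
  (req_type ≠ "near_left" ∧ req_type ≠ "near_right" ∧ target ∉ nums)
instance (nums : List Int) (target : Int) (req_type : String) : Decidable (Pre_get_almost nums target req_type) := by unfold Pre_get_almost; infer_instance

def pvWitness_get_almost : List Int × Int × String := ([1, 3, 5], 2, "near_left")

def Spec_get_almost (nums : List Int) (target : Int) (req_type : String) (out : Int) : Prop := out = get_almost_alt nums target req_type
instance (nums : List Int) (target : Int) (req_type : String) (out : Int) : Decidable (Spec_get_almost nums target req_type out) := by unfold Spec_get_almost; infer_instance

-- ===== CLAIM (what is proved, stated in full; the proofs are below) =====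
def Claim_equal_get_almost : Prop := ∀ (nums : List Int) (target : Int) (req_type : String), Dom_get_almost nums target req_type → Pre_get_almost nums target req_type → Spec_get_almost nums target req_type (get_almost nums target req_type)

-- ===== LEMMAS AND PROOFS =====

theorem pyAt_eq_getD (nums : List Int) (i : Int) (h0 : 0 ≤ i) (h1 : i < nums.length) :
    pyAt nums i = nums.getD i.toNat 0 := by
  unfold pyAt
  rw [PySem.List.pyGet?_eq_some_getElem nums h0 h1]
  rw [List.getD_eq_getElem _ _ (by omega : i.toNat < nums.length)]
  rfl

theorem sorted_getD {nums : List Int} (h : List.Pairwise (· ≤ ·) nums) {i j : Nat}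
    (hij : i ≤ j) (hj : j < nums.length) : nums.getD i 0 ≤ nums.getD j 0 := by
  rcases Nat.lt_or_eq_of_le hij with hlt | rfl
  · have := List.pairwise_iff_getElem.mp h i j (by omega) hj hlt
    rw [List.getD_eq_getElem _ _ (by omega), List.getD_eq_getElem _ _ hj]
    exact this
  · rfl

theorem scanB_spec (nums : List Int) (target : Int) :
    ∀ idx : Nat, idx ≤ nums.length →
      idx ≤ scanB nums target idx ∧ scanB nums target idx ≤ nums.length ∧
      (∀ j, idx ≤ j → j < scanB nums target idx → nums.getD j 0 < target) ∧
      (scanB nums target idx < nums.length → ¬ nums.getD (scanB nums target idx) 0 < target) := by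
  intro idx
  induction idx using scanB.induct (nums := nums) (target := target) with
  | case1 idx h hlt ih =>
    intro _
    rw [scanB, dif_pos h, if_pos hlt]
    obtain ⟨ih1, ih2, ih3, ih4⟩ := ih (by omega)
    refine ⟨by omega, ih2, ?_, ih4⟩
    intro j hj1 hj2
    rcases Nat.lt_or_ge j (idx + 1) with hc | hc
    · have : j = idx := by omega
      subst this
      rwa [List.getD_eq_getElem _ _ h]
    · exact ih3 j hc hj2
  | case2 idx h hlt =>
    intro _
    rw [scanB, dif_pos h, if_neg hlt]
    exact ⟨le_refl _, by omega, by omega, fun _ => by rwa [List.getD_eq_getElem _ _ h]⟩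
  | case3 idx h =>
    intro hle
    rw [scanB, dif_neg h]
    exact ⟨le_refl _, hle, by omega, fun hc => absurd hc h⟩

-- A's loop when no element equals target: it converges to l = L, r = L - 1
theorem goA_noTarget (nums : List Int) (target : Int) (req_type : String) (L : Nat)
    (hlo : ∀ j, j < L → nums.getD j 0 < target)
    (hhi : ∀ j, L ≤ j → j < nums.length → target < nums.getD j 0) :
    ∀ k : Nat, ∀ l r : Int, (r + 1 - l).toNat ≤ k →
      0 ≤ l → l ≤ (L : Int) → (L : Int) ≤ r + 1 → r ≤ (nums.length : Int) - 1 →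
      goA nums target req_type l r = fallbackB nums req_type (L : Int) := by
  intro k
  induction k with
  | zero =>
    intro l r hk h0 h1 h2 h3
    rw [goA, if_neg (by omega)]
    have hl : l = (L : Int) := by omega
    have hr : r = (L : Int) - 1 := by omega
    unfold fallbackB
    rw [hl, hr]
  | succ k ih =>
    intro l r hk h0 h1 h2 h3
    by_cases hlr : l ≤ r
    · rw [goA, if_pos hlr]
      have hmidb := PySem.Int.floordiv_two_mid_bounds (lo := 0) (hi := r - l) (by omega)
      rw [zero_add] at hmidb
      set mid := l + PySem.Int.floordiv (r - l) 2 with hmid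
      have hm0 : 0 ≤ mid := by omega
      have hm1 : mid < (nums.length : Int) := by omega
      have hAt : pyAt nums mid = nums.getD mid.toNat 0 := pyAt_eq_getD nums mid hm0 hm1
      by_cases hcL : mid.toNat < L
      · -- left of L: value < target, take the else (l := mid + 1) branch
        have hv : nums.getD mid.toNat 0 < target := hlo _ hcL
        rw [if_neg (by omega), if_neg (by omega)]
        exact ih (mid + 1) r (by omega) (by omega) (by omega) (by omega) h3
      · -- at/right of L: value > target, take the r := mid - 1 branch
        have hv : target < nums.getD mid.toNat 0 := hhi _ (by omega) (by omega)
        rw [if_neg (by omega), if_pos (by omega)]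
        exact ih l (mid - 1) (by omega) h0 h1 (by omega) (by omega)
    · rw [goA, if_neg hlr]
      have hl : l = (L : Int) := by omega
      have hr : r = (L : Int) - 1 := by omega
      unfold fallbackB
      rw [hl, hr]

-- A's loop when no element equals target and req_type takes the final -1 branch (no sortedness needed)
theorem goA_neutral (nums : List Int) (target : Int) (req_type : String)
    (hnl : req_type ≠ "near_left") (hnr : req_type ≠ "near_right")
    (habs : ∀ j, j < nums.length → nums.getD j 0 ≠ target) :
    ∀ k : Nat, ∀ l r : Int, (r + 1 - l).toNat ≤ k →
      0 ≤ l → r ≤ (nums.length : Int) - 1 →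
      goA nums target req_type l r = -1 := by
  intro k
  induction k with
  | zero =>
    intro l r hk h0 h3
    rw [goA, if_neg (by omega), if_neg hnl, if_neg hnr]
  | succ k ih =>
    intro l r hk h0 h3
    by_cases hlr : l ≤ r
    · rw [goA, if_pos hlr]
      have hmidb := PySem.Int.floordiv_two_mid_bounds (lo := 0) (hi := r - l) (by omega)
      rw [zero_add] at hmidb
      set mid := l + PySem.Int.floordiv (r - l) 2 with hmid
      have hAt : pyAt nums mid = nums.getD mid.toNat 0 := pyAt_eq_getD nums mid (by omega) (by omega)
      have hne : nums.getD mid.toNat 0 ≠ target := habs _ (by omega)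
      rw [if_neg (by omega)]
      by_cases hv : pyAt nums mid > target
      · rw [if_pos hv]
        exact ih l (mid - 1) (by omega) h0 (by omega)
      · rw [if_neg hv]
        exact ih (mid + 1) r (by omega) (by omega) h3
    · rw [goA, if_neg hlr, if_neg hnl, if_neg hnr]

-- A's loop when some element equals target: it returns target
theorem goA_found (nums : List Int) (target : Int) (req_type : String)
    (hsort : List.Pairwise (· ≤ ·) nums) :
    ∀ k : Nat, ∀ l r : Int, (r + 1 - l).toNat ≤ k →
      0 ≤ l → r ≤ (nums.length : Int) - 1 →
      (∃ i : Nat, l ≤ (i : Int) ∧ (i : Int) ≤ r ∧ nums.getD i 0 = target) →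
      goA nums target req_type l r = target := by
  intro k
  induction k with
  | zero =>
    intro l r hk h0 h3 ⟨i, hi1, hi2, hi3⟩
    omega
  | succ k ih =>
    intro l r hk h0 h3 ⟨i, hi1, hi2, hi3⟩
    have hlr : l ≤ r := by omega
    rw [goA, if_pos hlr]
    have hmidb := PySem.Int.floordiv_two_mid_bounds (lo := 0) (hi := r - l) (by omega)
    rw [zero_add] at hmidb
    set mid := l + PySem.Int.floordiv (r - l) 2 with hmid
    have hm0 : 0 ≤ mid := by omega
    have hm1 : mid < (nums.length : Int) := by omega
    have hAt : pyAt nums mid = nums.getD mid.toNat 0 := pyAt_eq_getD nums mid hm0 hm1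
    by_cases heq : nums.getD mid.toNat 0 = target
    · rw [if_pos (by omega), hAt, heq]
    · rcases lt_or_gt_of_ne heq with hv | hv
      · -- nums[mid] < target: the target index is right of mid
        have himid : mid < (i : Int) := by
          by_contra hc
          have : nums.getD i 0 ≤ nums.getD mid.toNat 0 := sorted_getD hsort (by omega) (by omega)
          omega
        rw [if_neg (by omega), if_neg (by omega)]
        exact ih (mid + 1) r (by omega) (by omega) h3 ⟨i, by omega, hi2, hi3⟩
      · -- nums[mid] > target: the target index is left of mid
        have himid : (i : Int) < mid := by
          by_contra hc
          have : nums.getD mid.toNat 0 ≤ nums.getD i 0 := sorted_getD hsort (by omega) (by omega)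
          omega
        rw [if_neg (by omega), if_pos (by omega)]
        exact ih l (mid - 1) (by omega) h0 (by omega) ⟨i, hi1, by omega, hi3⟩

-- ===== VERDICT (by name: the statement is the Claim_ definition above) =====
theorem get_almost_spec : Claim_equal_get_almost := by
  intro nums target req_type _dom hpre
  unfold Spec_get_almost get_almost get_almost_alt
  obtain ⟨hL1, hL2, hL3, hL4⟩ := scanB_spec nums target 0 (by omega)
  set L := scanB nums target 0 with hLdef
  rcases hpre with ⟨hsort, -, -⟩ | ⟨hnl, hnr, hmem⟩
  case inr =>
    -- non-near req_type and target absent: both sides return -1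
    have habs : ∀ j, j < nums.length → nums.getD j 0 ≠ target := by
      intro j hj hc
      rw [List.getD_eq_getElem _ _ hj] at hc
      exact hmem (hc ▸ nums.getElem_mem hj)
    have hB : ¬ (L < nums.length ∧ pyAt nums (L : Int) = target) := by
      rintro ⟨hc1, hc2⟩
      rw [pyAt_eq_getD nums (L : Int) (by omega) (by exact_mod_cast hc1)] at hc2
      simp only [Int.toNat_natCast] at hc2
      exact habs L hc1 hc2
    rw [if_neg hB]
    unfold fallbackB
    rw [if_neg hnl, if_neg hnr]
    exact goA_neutral nums target req_type hnl hnr habs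
      ((nums.length : Int) + 1 - 0).toNat 0 ((nums.length : Int) - 1) (by omega) (by omega) (by omega)
  by_cases hpresent : ∃ i : Nat, i < nums.length ∧ nums.getD i 0 = target
  · -- target occurs: both return target
    obtain ⟨i, hi1, hi2⟩ := hpresent
    have hiL : L ≤ i := by
      by_contra hc
      have := hL3 i (by omega) (by omega)
      omega
    have hLlt : L < nums.length := by omega
    have hLval : nums.getD L 0 = target := by
      have h1 : nums.getD L 0 ≤ nums.getD i 0 := sorted_getD hsort hiL hi1
      have h2 := hL4 hLlt
      omega
    have hAtL : pyAt nums (L : Int) = target := by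
      rw [pyAt_eq_getD nums (L : Int) (by omega) (by exact_mod_cast hLlt)]
      simpa using hLval
    rw [if_pos ⟨hLlt, hAtL⟩, hAtL]
    exact goA_found nums target req_type hsort ((nums.length : Int) + 1 - 0).toNat 0
      ((nums.length : Int) - 1) (by omega) (by omega) (by omega)
      ⟨i, by omega, by omega, hi2⟩
  · -- target absent: A converges to (L, L-1); B takes the fallback at L
    push Not at hpresent
    have hlo : ∀ j, j < L → nums.getD j 0 < target := fun j hj => hL3 j (by omega) hj
    have hhi : ∀ j, L ≤ j → j < nums.length → target < nums.getD j 0 := by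
      intro j hj1 hj2
      have h1 : nums.getD L 0 ≤ nums.getD j 0 := sorted_getD hsort hj1 hj2
      have h2 := hL4 (by omega)
      have h3 := hpresent j hj2
      omega
    have hB : ¬ (L < nums.length ∧ pyAt nums (L : Int) = target) := by
      rintro ⟨hc1, hc2⟩
      rw [pyAt_eq_getD nums (L : Int) (by omega) (by exact_mod_cast hc1)] at hc2
      simp only [Int.toNat_natCast] at hc2
      exact hpresent L hc1 hc2
    rw [if_neg hB]
    exact goA_noTarget nums target req_type L hlo hhi
      ((nums.length : Int) + 1 - 0).toNat 0 ((nums.length : Int) - 1)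
      (by omega) (by omega) (by omega) (by omega) (by omega)
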